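-- pv_equiv track=rewrite | github.com/geronimp/enrichM | enrichm/generate.py | _numerify
-- ===== SOURCE A (Python) =====
-- def _numerify(input_list):
--     '''
--
--     Inputs
--     ------
--
--     Outputs
--     -------
--
--     '''
--     idx = 0
--     output_dictionary = {}
--     output_list = []
--
--     for group in input_list:
--         if group not in output_dictionary:
--             output_dictionary[group] = idx
--             idx += 1
--         output_list.append(output_dictionary[group])
--     output_dictionary = {item:key for key, item in output_dictionary.items()}
--     return output_dictionary, output_list
-- ===== SOURCE B (Python) =====
-- def _numerify(input_list):
--     unique = list(dict.fromkeys(input_list))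
--     id_to_item = dict(enumerate(unique))
--     item_to_id = {item: i for i, item in id_to_item.items()}
--     output_list = [item_to_id[x] for x in input_list]
--     return id_to_item, output_list
-- ===== Notes on version B (the rewrite author's own statement) =====
-- stated objective: alternative
-- what changed: A's single fused loop (mutating a dict, a counter and the output list together, then inverting the dict) is replaced by a build-index-then-map decomposition: dedup via dict.fromkeys, build the id->item dict directly with enumerate, derive the item->id lookup, and produce the output list in a separate map pass.
import Mathlib
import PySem

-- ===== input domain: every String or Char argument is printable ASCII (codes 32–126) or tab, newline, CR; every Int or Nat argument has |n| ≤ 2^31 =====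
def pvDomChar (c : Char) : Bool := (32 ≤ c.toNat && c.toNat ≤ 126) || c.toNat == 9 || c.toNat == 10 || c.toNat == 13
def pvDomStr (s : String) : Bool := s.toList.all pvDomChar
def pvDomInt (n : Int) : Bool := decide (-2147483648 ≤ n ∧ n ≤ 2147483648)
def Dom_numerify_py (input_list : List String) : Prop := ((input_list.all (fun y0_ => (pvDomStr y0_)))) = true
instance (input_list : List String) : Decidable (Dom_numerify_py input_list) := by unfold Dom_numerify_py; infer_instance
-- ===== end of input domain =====

-- B replaces A's single fused loop (dict + counter + output built together, dict inverted at the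
-- end) by a build-index-then-map decomposition (dedup, enumerate, derived lookup, separate map pass).

-- ===== PORT A =====
-- the body of A's for-loop: state (idx, output_dictionary, output_list)
def numerifyStep (st : Int × PySem.Dict String Int × List Int) (group : String) :
    Int × PySem.Dict String Int × List Int :=
  -- if group not in output_dictionary: output_dictionary[group] = idx; idx += 1
  let p := if st.2.1.contains group then (st.1, st.2.1) else (st.1 + 1, st.2.1.insert group st.1)
  -- output_list.append(output_dictionary[group]) — the key is present at this point, so getD is exact
  (p.1, p.2, st.2.2 ++ [p.2.getD group 0])

def numerify_py (input_list : List String) : (List (Int × String)) × List Int :=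
  let st := input_list.foldl numerifyStep (0, PySem.Dict.empty, [])
  -- {item: key for key, item in output_dictionary.items()}: the values 0..idx-1 are pairwise
  -- distinct, so this comprehension's dict has exactly the swapped items list
  (st.2.1.items.map (fun p => (p.2, p.1)), st.2.2)

-- ===== PORT B =====
def numerify_py_alt (input_list : List String) : (List (Int × String)) × List Int :=
  let unique := PySem.List.dedup input_list            -- list(dict.fromkeys(input_list))
  let id_to_item := PySem.List.enumerate unique 0      -- dict(enumerate(unique)): keys distinct, items as built
  -- {item: i for i, item in id_to_item.items()} — a dict comprehension is a fold of inserts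
  let item_to_id := id_to_item.foldl (fun (d : PySem.Dict String Int) p => d.insert p.2 p.1) PySem.Dict.empty
  -- [item_to_id[x] for x in input_list] — every x is a key of item_to_id, so getD is exact
  (id_to_item, input_list.map (fun x => item_to_id.getD x 0))

-- ===== PRECONDITION & SPEC =====
def Spec_numerify_py (input_list : List String) (out : (List (Int × String)) × List Int) : Prop := out = numerify_py_alt input_list
instance (input_list : List String) (out : (List (Int × String)) × List Int) : Decidable (Spec_numerify_py input_list out) := by unfold Spec_numerify_py; infer_instance

-- ===== CLAIM (what is proved, stated in full; the proofs are below) =====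
def Claim_equal_numerify_py : Prop := ∀ (input_list : List String), Dom_numerify_py input_list → Spec_numerify_py input_list (numerify_py input_list)

-- ===== LEMMAS AND PROOFS =====

-- the dictionary A has built after a prefix whose ordered distinct elements are u
def dictOf (u : List String) : PySem.Dict String Int :=
  PySem.Dict.mk ((PySem.List.enumerate u 0).map (fun p => (p.2, p.1)))

theorem keys_dictOf (u : List String) : (dictOf u).keys = u := by
  simp [dictOf, PySem.Dict.keys, List.map_map, Function.comp_def]

theorem contains_dictOf (u : List String) (x : String) :
    (dictOf u).contains x = decide (x ∈ u) := by
  rw [PySem.Dict.contains_eq_decide_mem_keys, keys_dictOf]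

theorem getD_dictOf (u : List String) (x : String) (hu : u.Nodup) (hx : x ∈ u) :
    (dictOf u).getD x 0 = ((u.idxOf x : Nat) : Int) := by
  apply PySem.Dict.getD_of_mem_items
  · simp only [dictOf, List.mem_map]
    refine ⟨(((u.idxOf x : Nat) : Int), x), ?_, rfl⟩
    rw [PySem.List.mem_enumerate_iff]
    exact ⟨u.idxOf x, List.idxOf_lt_length_of_mem hx, by
      simp [List.getElem_idxOf (List.idxOf_lt_length_of_mem hx)]⟩
  · rw [keys_dictOf]; exact hu

theorem insert_dictOf (u : List String) (x : String) (hx : x ∉ u) :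
    (dictOf u).insert x (u.length : Int) = dictOf (u ++ [x]) := by
  apply PySem.Dict.ext
  rw [PySem.Dict.items_insert_of_not_contains (dictOf u) ((u.length : Nat) : Int)
        (by simp [contains_dictOf, hx])]
  simp only [dictOf, PySem.List.enumerate_append, List.map_append]
  simp [PySem.List.enumerate]

theorem loopA (l : List String) : ∀ (u : List String) (out : List Int), u.Nodup →
    l.foldl numerifyStep ((u.length : Int), dictOf u, out)
    = (((PySem.Set.update u l).length : Int), dictOf (PySem.Set.update u l),
       out ++ l.map (fun x => (((PySem.Set.update u l).idxOf x : Nat) : Int))) := by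
  induction l with
  | nil => intro u out hu; simp [PySem.Set.update]
  | cons g l ih =>
    intro u out hu
    rw [List.foldl_cons]
    by_cases hg : g ∈ u
    · have hstep : numerifyStep ((u.length : Int), dictOf u, out) g
          = ((u.length : Int), dictOf u, out ++ [((u.idxOf g : Nat) : Int)]) := by
        simp [numerifyStep, contains_dictOf, hg, getD_dictOf u g hu hg]
      rw [hstep, ih u _ hu]
      have hupd : PySem.Set.update u (g :: l) = PySem.Set.update u l := by
        rw [PySem.Set.update_cons, PySem.Set.add_of_mem hg]
      rw [hupd]
      simp only [Prod.mk.injEq, true_and]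
      rw [List.map_cons, List.append_assoc]
      congr 2
      obtain ⟨t, ht⟩ : ∃ t, PySem.Set.update u l = u ++ t :=
        ⟨_, PySem.Set.update_eq_append_filter u l⟩
      rw [ht, List.idxOf_append_of_mem hg]
      simp
    · have hstep : numerifyStep ((u.length : Int), dictOf u, out) g
          = (((u ++ [g]).length : Int), dictOf (u ++ [g]), out ++ [(u.length : Int)]) := by
        simp only [numerifyStep, contains_dictOf]
        rw [decide_eq_false hg]
        simp only [Bool.false_eq_true, if_false]
        rw [PySem.Dict.getD_insert_self, insert_dictOf u g hg]
        norm_num [List.length_append]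
      rw [hstep, ih (u ++ [g]) _ (by
        simp [List.nodup_append, hu]
        intro a ha hag
        subst hag
        exact hg ha)]
      have hupd : PySem.Set.update u (g :: l) = PySem.Set.update (u ++ [g]) l := by
        rw [PySem.Set.update_cons, PySem.Set.add_of_not_mem hg]
      rw [← hupd]
      simp only [Prod.mk.injEq, true_and]
      rw [List.map_cons, List.append_assoc]
      congr 2
      obtain ⟨t, ht⟩ : ∃ t, PySem.Set.update (u ++ [g]) l = (u ++ [g]) ++ t :=
        ⟨_, PySem.Set.update_eq_append_filter (u ++ [g]) l⟩
      rw [hupd, ht, List.idxOf_append_of_mem (by simp), List.idxOf_append_of_notMem hg]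
      simp

-- B's item_to_id fold builds exactly dictOf (dedup l)
theorem altDict (l : List String) :
    (PySem.List.enumerate (PySem.List.dedup l) 0).foldl
      (fun (d : PySem.Dict String Int) p => d.insert p.2 p.1) PySem.Dict.empty
    = dictOf (PySem.List.dedup l) := by
  apply PySem.Dict.ext
  rw [PySem.Dict.items_foldl_insert_fresh (PySem.List.enumerate (PySem.List.dedup l) 0)
        (fun p => p.2) (fun p => p.1) PySem.Dict.empty
        (by intro a _; simp [PySem.Dict.contains_empty])
        (by simp)]
  simp [dictOf, PySem.Dict.empty]

theorem numerify_eq (l : List String) : numerify_py l = numerify_py_alt l := by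
  have h0 : (dictOf [] : PySem.Dict String Int) = PySem.Dict.empty := by
    apply PySem.Dict.ext; simp [dictOf, PySem.List.enumerate, PySem.Dict.empty]
  have hmain := loopA l [] [] List.nodup_nil
  have hupd : PySem.Set.update [] l = PySem.List.dedup l := by
    rw [PySem.Set.update_nil_left]; simp
  rw [h0, hupd] at hmain
  have hmain' : l.foldl numerifyStep ((0 : Int), PySem.Dict.empty, ([] : List Int))
      = (((PySem.List.dedup l).length : Int), dictOf (PySem.List.dedup l),
         l.map (fun x => (((PySem.List.dedup l).idxOf x : Nat) : Int))) := by
    simpa using hmain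
  simp only [numerify_py, numerify_py_alt, hmain', altDict]
  refine Prod.ext ?_ ?_
  · simp [dictOf, List.map_map, Function.comp_def]
  · refine (List.map_congr_left ?_).symm
    intro x hx
    rw [getD_dictOf _ _ (PySem.List.nodup_dedup l) (by simp [hx])]

-- ===== VERDICT (by name: the statement is the Claim_ definition above) =====
theorem numerify_py_spec : Claim_equal_numerify_py := by
  intro l _
  unfold Spec_numerify_py
  exact numerify_eq l
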